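-- pv_equiv track=rewrite | github.com/MistakenPirate/cd_practice | dfa_if_else.py | keyword_dfa
-- ===== SOURCE A (Python) =====
-- def keyword_dfa(word):
--     state = 'q0'
--     transition = {
--         'q0' : { 'i' : 'q1', 'e' : 'q2', 'w' : 'q3', 'r' : 'q4'},
--         'q1' : { 'f' : 'ACCEPT_IF'},
--         'q2' : { 'l' : 'q2a'},
--         'q2a' : {'s' : 'q2b'},
--         'q2b' : {'e' : 'ACCEPT_ELSE'},
--         'q3' : {'h' : 'q3a'},
--         'q3a' : {'i' : 'q3b'},
--         'q3b' : {'l' : 'q3c'},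
--         'q3c' : {'e' : 'ACCEPT_WHILE'},
--         'q4' : {'e' : 'q4a'},
--         'q4a' : {'t' : 'q4b'},
--         'q4b' : {'u' : 'q4c'},
--         'q4c' : {'r' : 'q4d'},
--         'q4d' : {'n' : 'ACCEPT_RETURN'}
--     }
--     accepting_states = {'ACCEPT_IF','ACCEPT_ELSE','ACCEPT_WHILE','ACCEPT_RETURN'}
--
--     for char in word:
--         if state in transition and char in transition[state]:
--             state = transition[state][char]
--         else:
--             return False
--
--     return state in accepting_states
-- ===== SOURCE B (Python) =====
-- def keyword_dfa(word):
--     return word in ('if', 'else', 'while', 'return')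
-- ===== Notes on version B (the rewrite author's own statement) =====
-- stated objective: simpler
-- what changed: Replaced the character-by-character DFA walk over a transition table with a single closed-form membership test of the whole word against the four keywords.
import Mathlib
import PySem

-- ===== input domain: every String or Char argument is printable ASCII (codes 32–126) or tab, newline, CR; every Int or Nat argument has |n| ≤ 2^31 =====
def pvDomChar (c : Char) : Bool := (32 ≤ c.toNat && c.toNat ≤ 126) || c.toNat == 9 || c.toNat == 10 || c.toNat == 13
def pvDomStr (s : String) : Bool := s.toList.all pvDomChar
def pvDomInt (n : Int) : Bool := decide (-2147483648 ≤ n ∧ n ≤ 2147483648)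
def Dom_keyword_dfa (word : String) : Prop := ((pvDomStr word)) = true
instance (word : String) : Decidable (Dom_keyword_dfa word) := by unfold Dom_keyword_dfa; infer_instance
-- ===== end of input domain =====

-- B replaces A's character-by-character DFA walk over a transition table with a
-- single membership test of the whole word against the four keywords (objective: simpler).

-- ===== PORT A =====
-- the transition dict literal of A
def kwTransition : PySem.Dict String (PySem.Dict Char String) := PySem.Dict.mk
  [ ("q0",  PySem.Dict.mk [('i', "q1"), ('e', "q2"), ('w', "q3"), ('r', "q4")])
  , ("q1",  PySem.Dict.mk [('f', "ACCEPT_IF")])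
  , ("q2",  PySem.Dict.mk [('l', "q2a")])
  , ("q2a", PySem.Dict.mk [('s', "q2b")])
  , ("q2b", PySem.Dict.mk [('e', "ACCEPT_ELSE")])
  , ("q3",  PySem.Dict.mk [('h', "q3a")])
  , ("q3a", PySem.Dict.mk [('i', "q3b")])
  , ("q3b", PySem.Dict.mk [('l', "q3c")])
  , ("q3c", PySem.Dict.mk [('e', "ACCEPT_WHILE")])
  , ("q4",  PySem.Dict.mk [('e', "q4a")])
  , ("q4a", PySem.Dict.mk [('t', "q4b")])
  , ("q4b", PySem.Dict.mk [('u', "q4c")])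
  , ("q4c", PySem.Dict.mk [('r', "q4d")])
  , ("q4d", PySem.Dict.mk [('n', "ACCEPT_RETURN")]) ]

def kwAccepting : PySem.Set String :=
  PySem.Set.ofList ["ACCEPT_IF", "ACCEPT_ELSE", "ACCEPT_WHILE", "ACCEPT_RETURN"]

-- one loop iteration of A; `none` models the early `return False`
def kwStep (st : Option String) (c : Char) : Option String :=
  match st with
  | none => none
  | some s =>
    if kwTransition.contains s then
      match kwTransition.get? s with
      | some inner =>
        match inner.get? c with
        | some s' => some s'
        | none => none
      | none => none
    else none

def keyword_dfa (word : String) : Bool :=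
  match word.toList.foldl kwStep (some "q0") with
  | none => false
  | some s => kwAccepting.contains s

-- ===== PORT B =====
def keyword_dfa_alt (word : String) : Bool :=
  word == "if" || word == "else" || word == "while" || word == "return"

-- ===== PRECONDITION & SPEC =====
def Spec_keyword_dfa (word : String) (out : Bool) : Prop := out = keyword_dfa_alt word
instance (word : String) (out : Bool) : Decidable (Spec_keyword_dfa word out) := by unfold Spec_keyword_dfa; infer_instance

-- ===== CLAIM (what is proved, stated in full; the proofs are below) =====
def Claim_equal_keyword_dfa : Prop := ∀ (word : String), Dom_keyword_dfa word → Spec_keyword_dfa word (keyword_dfa word)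

-- ===== LEMMAS AND PROOFS =====

-- "accepting from state q" as a function of the remaining characters
def kwF (q : String) (l : List Char) : Bool :=
  match l.foldl kwStep (some q) with
  | none => false
  | some s => kwAccepting.contains s

theorem kwRun_none (l : List Char) : l.foldl kwStep none = none := by
  induction l with
  | nil => rfl
  | cons c t ih => simpa [List.foldl, kwStep] using ih

theorem kwF_cons (q : String) (c : Char) (t : List Char) :
    kwF q (c :: t) = match kwStep (some q) c with
                     | none => false
                     | some s => kwF s t := by
  cases h : kwStep (some q) c <;> simp [kwF, List.foldl, h, kwRun_none]

theorem kwF_accept (q : String)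
    (hq : q = "ACCEPT_IF" ∨ q = "ACCEPT_ELSE" ∨ q = "ACCEPT_WHILE" ∨ q = "ACCEPT_RETURN")
    (l : List Char) : kwF q l = decide (l = []) := by
  cases l with
  | nil => rcases hq with h|h|h|h <;> subst h <;> decide
  | cons c t =>
    rw [kwF_cons]
    have hstep : kwStep (some q) c = none := by
      rcases hq with h|h|h|h <;> subst h <;> rfl
    simp [hstep]

theorem kwF_q4d (l : List Char) : kwF "q4d" l = decide (l = ['n']) := by
  cases l with
  | nil => decide
  | cons c t =>
    rw [kwF_cons]
    by_cases hc : 'n' = c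
    · subst hc
      simpa [kwStep, kwTransition, PySem.Dict.get?] using
        kwF_accept "ACCEPT_RETURN" (by simp) t
    · simp [kwStep, kwTransition, PySem.Dict.get?, hc, Ne.symm hc]

theorem kwF_q4c (l : List Char) : kwF "q4c" l = decide (l = ['r', 'n']) := by
  cases l with
  | nil => decide
  | cons c t =>
    rw [kwF_cons]
    by_cases hc : 'r' = c
    · subst hc; simpa [kwStep, kwTransition, PySem.Dict.get?] using kwF_q4d t
    · simp [kwStep, kwTransition, PySem.Dict.get?, hc, Ne.symm hc]

theorem kwF_q4b (l : List Char) : kwF "q4b" l = decide (l = ['u', 'r', 'n']) := by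
  cases l with
  | nil => decide
  | cons c t =>
    rw [kwF_cons]
    by_cases hc : 'u' = c
    · subst hc; simpa [kwStep, kwTransition, PySem.Dict.get?] using kwF_q4c t
    · simp [kwStep, kwTransition, PySem.Dict.get?, hc, Ne.symm hc]

theorem kwF_q4a (l : List Char) : kwF "q4a" l = decide (l = ['t', 'u', 'r', 'n']) := by
  cases l with
  | nil => decide
  | cons c t =>
    rw [kwF_cons]
    by_cases hc : 't' = c
    · subst hc; simpa [kwStep, kwTransition, PySem.Dict.get?] using kwF_q4b t
    · simp [kwStep, kwTransition, PySem.Dict.get?, hc, Ne.symm hc]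

theorem kwF_q4 (l : List Char) : kwF "q4" l = decide (l = ['e', 't', 'u', 'r', 'n']) := by
  cases l with
  | nil => decide
  | cons c t =>
    rw [kwF_cons]
    by_cases hc : 'e' = c
    · subst hc; simpa [kwStep, kwTransition, PySem.Dict.get?] using kwF_q4a t
    · simp [kwStep, kwTransition, PySem.Dict.get?, hc, Ne.symm hc]

theorem kwF_q3c (l : List Char) : kwF "q3c" l = decide (l = ['e']) := by
  cases l with
  | nil => decide
  | cons c t =>
    rw [kwF_cons]
    by_cases hc : 'e' = c
    · subst hc
      simpa [kwStep, kwTransition, PySem.Dict.get?] using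
        kwF_accept "ACCEPT_WHILE" (by simp) t
    · simp [kwStep, kwTransition, PySem.Dict.get?, hc, Ne.symm hc]

theorem kwF_q3b (l : List Char) : kwF "q3b" l = decide (l = ['l', 'e']) := by
  cases l with
  | nil => decide
  | cons c t =>
    rw [kwF_cons]
    by_cases hc : 'l' = c
    · subst hc; simpa [kwStep, kwTransition, PySem.Dict.get?] using kwF_q3c t
    · simp [kwStep, kwTransition, PySem.Dict.get?, hc, Ne.symm hc]

theorem kwF_q3a (l : List Char) : kwF "q3a" l = decide (l = ['i', 'l', 'e']) := by
  cases l with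
  | nil => decide
  | cons c t =>
    rw [kwF_cons]
    by_cases hc : 'i' = c
    · subst hc; simpa [kwStep, kwTransition, PySem.Dict.get?] using kwF_q3b t
    · simp [kwStep, kwTransition, PySem.Dict.get?, hc, Ne.symm hc]

theorem kwF_q3 (l : List Char) : kwF "q3" l = decide (l = ['h', 'i', 'l', 'e']) := by
  cases l with
  | nil => decide
  | cons c t =>
    rw [kwF_cons]
    by_cases hc : 'h' = c
    · subst hc; simpa [kwStep, kwTransition, PySem.Dict.get?] using kwF_q3a t
    · simp [kwStep, kwTransition, PySem.Dict.get?, hc, Ne.symm hc]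

theorem kwF_q2b (l : List Char) : kwF "q2b" l = decide (l = ['e']) := by
  cases l with
  | nil => decide
  | cons c t =>
    rw [kwF_cons]
    by_cases hc : 'e' = c
    · subst hc
      simpa [kwStep, kwTransition, PySem.Dict.get?] using
        kwF_accept "ACCEPT_ELSE" (by simp) t
    · simp [kwStep, kwTransition, PySem.Dict.get?, hc, Ne.symm hc]

theorem kwF_q2a (l : List Char) : kwF "q2a" l = decide (l = ['s', 'e']) := by
  cases l with
  | nil => decide
  | cons c t =>
    rw [kwF_cons]
    by_cases hc : 's' = c
    · subst hc; simpa [kwStep, kwTransition, PySem.Dict.get?] using kwF_q2b t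
    · simp [kwStep, kwTransition, PySem.Dict.get?, hc, Ne.symm hc]

theorem kwF_q2 (l : List Char) : kwF "q2" l = decide (l = ['l', 's', 'e']) := by
  cases l with
  | nil => decide
  | cons c t =>
    rw [kwF_cons]
    by_cases hc : 'l' = c
    · subst hc; simpa [kwStep, kwTransition, PySem.Dict.get?] using kwF_q2a t
    · simp [kwStep, kwTransition, PySem.Dict.get?, hc, Ne.symm hc]

theorem kwF_q1 (l : List Char) : kwF "q1" l = decide (l = ['f']) := by
  cases l with
  | nil => decide
  | cons c t =>
    rw [kwF_cons]
    by_cases hc : 'f' = c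
    · subst hc
      simpa [kwStep, kwTransition, PySem.Dict.get?] using
        kwF_accept "ACCEPT_IF" (by simp) t
    · simp [kwStep, kwTransition, PySem.Dict.get?, hc, Ne.symm hc]

theorem kwF_q0 (l : List Char) :
    kwF "q0" l = (decide (l = ['i', 'f']) || decide (l = ['e', 'l', 's', 'e']) ||
                  decide (l = ['w', 'h', 'i', 'l', 'e']) ||
                  decide (l = ['r', 'e', 't', 'u', 'r', 'n'])) := by
  cases l with
  | nil => decide
  | cons c t =>
    rw [kwF_cons]
    by_cases hi : 'i' = c
    · subst hi; simpa [kwStep, kwTransition, PySem.Dict.get?] using kwF_q1 t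
    by_cases he : 'e' = c
    · subst he; simpa [kwStep, kwTransition, PySem.Dict.get?, hi] using kwF_q2 t
    by_cases hw : 'w' = c
    · subst hw; simpa [kwStep, kwTransition, PySem.Dict.get?, hi, he] using kwF_q3 t
    by_cases hr : 'r' = c
    · subst hr; simpa [kwStep, kwTransition, PySem.Dict.get?, hi, he, hw] using kwF_q4 t
    simp [kwStep, kwTransition, PySem.Dict.get?, hi, he, hw, hr, Ne.symm hi, Ne.symm he, Ne.symm hw, Ne.symm hr]

theorem string_beq_toList (s t : String) : (s == t) = decide (s.toList = t.toList) := by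
  by_cases h : s = t
  · subst h; simp
  · have h' : s.toList ≠ t.toList := fun hl => h (String.toList_inj.mp hl)
    simp [h, h']

-- ===== VERDICT (by name: the statement is the Claim_ definition above) =====
theorem keyword_dfa_spec : Claim_equal_keyword_dfa := by
  intro word _
  show keyword_dfa word = keyword_dfa_alt word
  have hA : keyword_dfa word = kwF "q0" word.toList := rfl
  rw [hA, kwF_q0, keyword_dfa_alt]
  rw [string_beq_toList, string_beq_toList, string_beq_toList, string_beq_toList]
  rfl
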